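-- pv_equiv track=rewrite | github.com/rybolovlevalexey/TimetableParserBot | old_version/parsing.py | make_duplicates
-- ===== SOURCE A (Python) =====
-- def make_duplicates(schedule: dict[str, list]) -> dict[str: dict[str: list[str]]]:
--     duplicate_items: dict[str: dict[str: list[str]]] = dict()
--     for key, value in schedule.items():
--         # key - день недели с датой, value - список с расписанием в этот день
--         k = key.split(", ")[0]
--         # добавление каждого дня как ключа в словарь дубликатов, и в каждый день по ключу
--         # Is checked cловаря с флагами на каждое время
--         duplicate_items[k] = dict()
--
--         for i in range(len(value) - 1):  # проход по расписанию в день key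
--             if (i == 0 and value[i][0] == value[i + 1][0]) or \
--                     (i > 0 and value[i][0] == value[i + 1][0] and
--                      value[i - 1][0] != value[i][0]):
--                 # value[i][0] - время проведения
--                 if value[i][0] not in duplicate_items[k].keys():
--                     # создание списка, если в день key и время value[i][0] не было дубликатов
--                     duplicate_items[k][value[i][0]] = list()
--                 duplicate_items[k][value[i][0]].append(value[i])
--                 duplicate_items[k][value[i][0]].append(value[i + 1])
--             elif i > 0 and value[i][0] == value[i + 1][0] and value[i - 1][0] == value[i][0]:
--                 if value[i][0] not in duplicate_items[k].keys():
--                     duplicate_items[k][value[i][0]] = list()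
--                 duplicate_items[k][value[i][0]].append(value[i + 1])
--     return duplicate_items
-- ===== SOURCE B (Python) =====
-- def make_duplicates(schedule: dict[str, list]) -> dict[str: dict[str: list[str]]]:
--     duplicate_items = {}
--     for key, value in schedule.items():
--         day = {}
--         if len(value) >= 2:
--             run = []  # current run of consecutive entries sharing the same time
--             for entry in value:
--                 if run and run[0][0] == entry[0]:
--                     run.append(entry)
--                 else:
--                     if len(run) >= 2:
--                         day.setdefault(run[0][0], []).extend(run)
--                     run = [entry]
--             if len(run) >= 2:
--                 day.setdefault(run[0][0], []).extend(run)
--         duplicate_items[key.split(", ")[0]] = day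
--     return duplicate_items
-- ===== Notes on version B (the rewrite author's own statement) =====
-- stated objective: simpler
-- what changed: A detects duplicates with index arithmetic, comparing value[i-1], value[i], value[i+1] under two look-back conditions and appending one or two entries per step; B makes one buffered-run pass per day, collecting each maximal run of consecutive equal times into a list and flushing it with setdefault/extend when it has at least two entries.
import Mathlib
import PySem

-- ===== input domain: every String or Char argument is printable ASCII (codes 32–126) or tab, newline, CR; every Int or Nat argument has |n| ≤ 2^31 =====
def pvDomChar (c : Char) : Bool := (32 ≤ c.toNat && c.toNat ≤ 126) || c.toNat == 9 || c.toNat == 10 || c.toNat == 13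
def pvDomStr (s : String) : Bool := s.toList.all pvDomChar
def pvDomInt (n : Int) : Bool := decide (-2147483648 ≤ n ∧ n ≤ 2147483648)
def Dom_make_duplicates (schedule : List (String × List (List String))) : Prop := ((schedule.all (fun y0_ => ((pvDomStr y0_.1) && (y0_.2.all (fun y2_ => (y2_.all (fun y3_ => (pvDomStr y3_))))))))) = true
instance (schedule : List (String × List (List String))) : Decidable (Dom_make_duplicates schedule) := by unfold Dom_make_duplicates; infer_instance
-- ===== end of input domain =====

-- B replaces A's index-arithmetic look-back conditions (comparing value[i-1], value[i], value[i+1]) by a single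
-- buffered-run pass (collect each maximal run of equal times, flush it if it has ≥ 2 entries): simpler decomposition.

-- ===== PORT A =====
-- key.split(", ")[0]  (split of a nonempty separator always succeeds and is nonempty)
def pvKeyOf (key : String) : String := (((PySem.Str.split? key ", ").getD []).headD "")

-- value[i][0] with int index i (entry [] would raise in Python; excluded by Pre_)
def pvTimeI (v : List (List String)) (i : Int) : String :=
  PySem.List.pyGetD (PySem.List.pyGetD v i []) 0 ""

-- the body of A's  for i in range(len(value) - 1)  loop
def pvStepA (v : List (List String)) (d : PySem.Dict String (List (List String))) (i : Int) :
    PySem.Dict String (List (List String)) :=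
  if ((i == 0) && (pvTimeI v i == pvTimeI v (i + 1)))
      || ((decide (0 < i)) && (pvTimeI v i == pvTimeI v (i + 1)) && (pvTimeI v (i - 1) != pvTimeI v i)) then
    d.modify (pvTimeI v i) [] (fun l => l ++ [PySem.List.pyGetD v i [], PySem.List.pyGetD v (i + 1) []])
  else if (decide (0 < i)) && (pvTimeI v i == pvTimeI v (i + 1)) && (pvTimeI v (i - 1) == pvTimeI v i) then
    d.modify (pvTimeI v i) [] (fun l => l ++ [PySem.List.pyGetD v (i + 1) []])
  else d

-- the inner dict A builds at duplicate_items[k] for one day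
def pvDayA (v : List (List String)) : PySem.Dict String (List (List String)) :=
  (PySem.List.pyRange 0 ((v.length : Int) - 1)).foldl (pvStepA v) PySem.Dict.empty

def make_duplicates (schedule : List (String × List (List String))) :
    List (String × List (String × List (List String))) :=
  ((schedule.foldl (fun acc kv => acc.insert (pvKeyOf kv.1) (pvDayA kv.2))
      (PySem.Dict.empty : PySem.Dict String (PySem.Dict String (List (List String))))).items).map
    (fun p => (p.1, p.2.items))

-- ===== PORT B =====
-- entry[0]  (entry [] would raise in Python; excluded by Pre_)
def pvTime0 (e : List String) : String := PySem.List.pyGetD e 0 ""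

-- if len(run) >= 2: day.setdefault(run[0][0], []).extend(run)
def pvFlush (day : PySem.Dict String (List (List String))) (run : List (List String)) :
    PySem.Dict String (List (List String)) :=
  if 2 ≤ run.length then day.modify (pvTime0 (run.headD [])) [] (fun l => l ++ run) else day

-- the body of B's  for entry in value  loop; state = (day, run)
def pvStepB (st : PySem.Dict String (List (List String)) × List (List String)) (entry : List String) :
    PySem.Dict String (List (List String)) × List (List String) :=
  if !st.2.isEmpty && (pvTime0 (st.2.headD []) == pvTime0 entry) then (st.1, st.2 ++ [entry])
  else (pvFlush st.1 st.2, [entry])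

def pvDayB (v : List (List String)) : PySem.Dict String (List (List String)) :=
  if 2 ≤ v.length then
    let st := v.foldl pvStepB ((PySem.Dict.empty : PySem.Dict String (List (List String))), [])
    pvFlush st.1 st.2
  else PySem.Dict.empty

def make_duplicates_alt (schedule : List (String × List (List String))) :
    List (String × List (String × List (List String))) :=
  ((schedule.foldl (fun acc kv => acc.insert (pvKeyOf kv.1) (pvDayB kv.2))
      (PySem.Dict.empty : PySem.Dict String (PySem.Dict String (List (List String))))).items).map
    (fun p => (p.1, p.2.items))

-- ===== PRECONDITION & SPEC =====
-- Pre_ excludes exactly the inputs where the Pythons raise IndexError: a day with at least two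
-- entries one of which is the empty list (value[i][0] fails there).
def Pre_make_duplicates (schedule : List (String × List (List String))) : Prop :=
  ∀ p ∈ schedule, 2 ≤ p.2.length → ∀ e ∈ p.2, e ≠ []
instance (schedule : List (String × List (List String))) : Decidable (Pre_make_duplicates schedule) := by
  unfold Pre_make_duplicates; infer_instance

def pvWitness_make_duplicates : (List (String × List (List String))) :=
  [("Mon, 5.3", [["9:00", "a"], ["9:00", "b"], ["10:00", "c"]]), ("Tue", [])]

def Spec_make_duplicates (schedule : List (String × List (List String))) (out : List (String × List (String × List (List String)))) : Prop := out = make_duplicates_alt schedule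
instance (schedule : List (String × List (List String))) (out : List (String × List (String × List (List String)))) : Decidable (Spec_make_duplicates schedule out) := by unfold Spec_make_duplicates; infer_instance

-- ===== CLAIM (what is proved, stated in full; the proofs are below) =====
def Claim_equal_make_duplicates : Prop := ∀ (schedule : List (String × List (List String))), Dom_make_duplicates schedule → Pre_make_duplicates schedule → Spec_make_duplicates schedule (make_duplicates schedule)

-- ===== LEMMAS AND PROOFS =====

-- A's loop, restated structurally: walk the list pairwise carrying the previous entry's time.
def pvProcA (prev : Option String) :
    List (List String) → PySem.Dict String (List (List String)) → PySem.Dict String (List (List String))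
  | [], d => d
  | [_], d => d
  | a :: b :: rest, d =>
    let ta := pvTime0 a
    let d' := if pvTime0 b = ta then
        (if prev = some ta then d.modify ta [] (fun l => l ++ [b])
         else d.modify ta [] (fun l => l ++ [a, b]))
      else d
    pvProcA (some ta) (b :: rest) d'

theorem pv_modify_modify {κ ν : Type} [BEq κ] [LawfulBEq κ] [DecidableEq κ]
    (d : PySem.Dict κ ν) (k : κ) (dflt : ν) (f g : ν → ν) :
    (d.modify k dflt f).modify k dflt g = d.modify k dflt (fun x => g (f x)) := by
  simp [PySem.Dict.modify, PySem.Dict.insert_insert_self]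

-- A's index loop equals the structural walk pvProcA.
theorem pv_bridgeA (v : List (List String)) : ∀ (m k : Nat) (d : PySem.Dict String (List (List String))),
    v.length - k = m →
    (PySem.List.pyRange (k : Int) ((v.length : Int) - 1)).foldl (pvStepA v) d
      = pvProcA (if k = 0 then none else some (pvTimeI v ((k : Int) - 1))) (v.drop k) d := by
  intro m
  induction m with
  | zero =>
    intro k d hm
    have hk : v.length ≤ k := by omega
    rw [PySem.List.pyRange_one_eq_nil (by omega), List.drop_eq_nil_of_le hk]
    cases hzero : (decide (k = 0)) <;> simp_all [pvProcA]
  | succ m ihm =>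
    intro k d hm
    have hk : k < v.length := by omega
    have hcons : v.drop k = v.getD k [] :: v.drop (k + 1) := by
      rw [List.getD_eq_getElem v [] hk]; exact List.drop_eq_getElem_cons hk
    by_cases hk1 : v.length ≤ k + 1
    · rw [PySem.List.pyRange_one_eq_nil (by omega)]
      rw [hcons, List.drop_eq_nil_of_le hk1]
      cases hzero : (decide (k = 0)) <;> simp_all [pvProcA]
    · have hk2 : k + 1 < v.length := by omega
      have hcons2 : v.drop (k + 1) = v.getD (k + 1) [] :: v.drop (k + 2) := by
        rw [List.getD_eq_getElem v [] hk2]; exact List.drop_eq_getElem_cons hk2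
      rw [PySem.List.pyRange_one_cons (by omega), List.foldl_cons]
      have ih := ihm (k + 1) (pvStepA v d (k : Int)) (by omega)
      rw [show (((k + 1 : Nat) : Int)) = (k : Int) + 1 by push_cast; ring,
        show (((k : Int) + 1) - 1) = (k : Int) by ring] at ih
      rw [ih, hcons, hcons2]
      simp only [pvProcA]
      have hga : PySem.List.pyGetD v (k : Int) [] = v.getD k [] := PySem.List.pyGetD_natCast v k []
      have hgb : PySem.List.pyGetD v ((k : Int) + 1) [] = v.getD (k + 1) [] := by
        rw [show ((k : Int) + 1) = (((k + 1 : Nat)) : Int) by push_cast; ring]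
        exact PySem.List.pyGetD_natCast v (k + 1) []
      have ha : pvTimeI v (k : Int) = pvTime0 (v.getD k []) := by
        simp [pvTimeI, pvTime0, hga]
      have hb : pvTimeI v ((k : Int) + 1) = pvTime0 (v.getD (k + 1) []) := by
        simp [pvTimeI, pvTime0, hgb]
      rw [if_neg (Nat.succ_ne_zero k), ha]
      congr 1
      simp only [pvStepA, hga, hgb, hb, ha]
      by_cases htab : pvTime0 (v.getD (k + 1) []) = pvTime0 (v.getD k [])
      · have htab' : pvTime0 (v[k + 1]?.getD []) = pvTime0 (v[k]?.getD []) := htab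
        by_cases hk0 : k = 0
        · subst hk0; simp only [Nat.cast_zero] at *; simp [htab']
        · have hne : ¬((k : Int) = 0) := by omega
          have hpos : (0 : Int) < (k : Int) := by omega
          by_cases htp : pvTimeI v ((k : Int) - 1) = pvTime0 (v.getD k [])
          · have htp' : pvTimeI v ((k : Int) - 1) = pvTime0 (v[k]?.getD []) := htp
            simp [htab', htp', hk0]
          · have htp' : ¬ pvTimeI v ((k : Int) - 1) = pvTime0 (v[k]?.getD []) := htp
            simp [htab', htp', hk0]
      · have htab' : ¬ pvTime0 (v[k + 1]?.getD []) = pvTime0 (v[k]?.getD []) := htab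
        have hsym : ¬ pvTime0 (v[k]?.getD []) = pvTime0 (v[k + 1]?.getD []) :=
          fun h => htab' h.symm
        by_cases hk0 : k = 0
        · subst hk0; simp only [Nat.cast_zero] at *; simp [htab', hsym]
        · have hne : ¬((k : Int) = 0) := by omega
          have hpos : (0 : Int) < (k : Int) := by omega
          simp [htab', hsym, hk0]

-- A's structural walk equals B's buffered-run fold, given the run invariant.
theorem pv_main : ∀ (rest : List (List String)) (a : List String) (r : List (List String))
    (p : Option String) (dB : PySem.Dict String (List (List String))),
    r.getLast? = some a → (∀ e ∈ r, pvTime0 e = pvTime0 a) →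
    (if r.length = 1 then p ≠ some (pvTime0 a) else p = some (pvTime0 a)) →
    pvProcA p (a :: rest) (pvFlush dB r)
      = (fun st : _ × _ => pvFlush st.1 st.2) (rest.foldl pvStepB (dB, r)) := by
  intro rest
  induction rest with
  | nil => intro a r p dB _ _ _; simp [pvProcA]
  | cons b rest' ih =>
    intro a r p dB hlast hall hp
    have hrne : r ≠ [] := by intro h; rw [h] at hlast; simp at hlast
    have hhtD : pvTime0 (r.headD []) = pvTime0 a := by
      cases r with
      | nil => exact absurd rfl hrne
      | cons x xs => exact hall x (by simp)
    have hht : pvTime0 (r.head?.getD []) = pvTime0 a := by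
      cases r with
      | nil => exact absurd rfl hrne
      | cons x xs => exact hall x (by simp)
    simp only [pvProcA]
    by_cases hbt : pvTime0 b = pvTime0 a
    · rw [if_pos hbt]
      by_cases hr1 : r.length = 1
      · -- r = [a]
        have hra : r = [a] := by
          cases r with
          | nil => simp at hr1
          | cons x xs =>
            cases xs with
            | nil => simp at hlast; rw [hlast]
            | cons y ys => simp at hr1
        rw [if_pos hr1] at hp
        rw [if_neg hp]
        have hfl : pvFlush dB r = dB := by rw [hra]; simp [pvFlush]
        rw [hfl]
        have hstep : pvStepB (dB, r) b = (dB, [a, b]) := by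
          rw [hra]; simp [pvStepB, hbt]
        have := ih b [a, b] (some (pvTime0 a)) dB (by simp)
          (by intro e he; simp at he
              rcases he with h | h
              · rw [h, hbt]
              · rw [h])
          (by simp [hbt])
        rw [show pvFlush dB [a, b] = dB.modify (pvTime0 a) [] (fun l => l ++ [a, b]) by
          simp [pvFlush]] at this
        rw [List.foldl_cons, hstep]
        exact this
      · have hp2 : p = some (pvTime0 a) := by rw [if_neg hr1] at hp; exact hp
        have hr2 : 2 ≤ r.length := by
          cases r with
          | nil => exact absurd rfl hrne
          | cons x xs => cases xs with
            | nil => simp at hr1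
            | cons y ys => simp
        rw [if_pos hp2]
        have hfl : pvFlush dB r = dB.modify (pvTime0 a) [] (fun l => l ++ r) := by
          simp [pvFlush, if_pos hr2, hht]
        rw [hfl, pv_modify_modify]
        have hcomb : (fun x => (x ++ r) ++ [b]) = (fun x : List (List String) => x ++ (r ++ [b])) := by
          funext x; simp
        rw [hcomb]
        have hstep : pvStepB (dB, r) b = (dB, r ++ [b]) := by
          simp [pvStepB, hrne, hht, hbt]
        have := ih b (r ++ [b]) (some (pvTime0 a)) dB (by simp)
          (by intro e he; simp at he
              rcases he with h | h
              · rw [hbt]; exact hall e h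
              · rw [h]
          )
          (by have : (r ++ [b]).length = r.length + 1 := by simp
              rw [if_neg (by omega)]; simp [hbt])
        have hlen : 2 ≤ (r ++ [b]).length := by simp; omega
        have hh3 : pvTime0 (r.head?.getD b) = pvTime0 a := by
          cases r with
          | nil => exact absurd rfl hrne
          | cons x xs => exact hall x (by simp)
        rw [show pvFlush dB (r ++ [b]) = dB.modify (pvTime0 a) [] (fun l => l ++ (r ++ [b])) by
          simp [pvFlush, hh3, show 1 ≤ r.length by omega]] at this
        rw [List.foldl_cons, hstep]
        exact this
    · rw [if_neg hbt]
      have hbt' : ¬ pvTime0 a = pvTime0 b := fun h => hbt h.symm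
      have hstep : pvStepB (dB, r) b = (pvFlush dB r, [b]) := by
        simp [pvStepB, hrne, hht, hbt']
      have := ih b [b] (some (pvTime0 a)) (pvFlush dB r) (by simp)
        (by intro e he; simp at he; rw [he])
        (by simp; intro h; exact hbt h.symm)
      rw [show pvFlush (pvFlush dB r) [b] = pvFlush dB r by simp [pvFlush]] at this
      rw [List.foldl_cons, hstep]
      exact this

theorem pv_day_eq (v : List (List String)) : pvDayA v = pvDayB v := by
  unfold pvDayA pvDayB
  by_cases h2 : 2 ≤ v.length
  · match v, h2 with
    | a :: rest, h2 =>
      have hb := pv_bridgeA (a :: rest) (a :: rest).length 0 PySem.Dict.empty (by simp)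
      norm_num at hb
      rw [show ((a :: rest).length : Int) - 1 = (rest.length : Int) by simp, hb]
      simp only [if_pos h2]
      have hstep : pvStepB (PySem.Dict.empty, []) a = (PySem.Dict.empty, [a]) := by
        simp [pvStepB, pvFlush]
      have hm := pv_main rest a [a] none PySem.Dict.empty (by simp) (by simp)
        (by simp)
      rw [show pvFlush PySem.Dict.empty [a] = PySem.Dict.empty by simp [pvFlush]] at hm
      simp only [List.foldl_cons, hstep]
      exact hm
  · have h1 : v.length ≤ 1 := by omega
    rw [PySem.List.pyRange_one_eq_nil (by omega)]
    simp [if_neg h2]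

-- ===== VERDICT (by name: the statement is the Claim_ definition above) =====
theorem make_duplicates_spec : Claim_equal_make_duplicates := by
  intro schedule _ _
  unfold Spec_make_duplicates make_duplicates make_duplicates_alt
  have h : (fun (acc : PySem.Dict String (PySem.Dict String (List (List String))))
        (kv : String × List (List String)) => acc.insert (pvKeyOf kv.1) (pvDayA kv.2))
      = (fun acc kv => acc.insert (pvKeyOf kv.1) (pvDayB kv.2)) := by
    funext acc kv; rw [pv_day_eq]
  rw [h]
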